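-- pv_equiv track=rewrite | github.com/ieesejin/algorithm_study | 프렌즈4블록.py | find4Block
-- ===== SOURCE A (Python) =====
-- def find4Block(m, n, board, cnt):
--     erasePoint = set() # 중복으로 지워지는 부분을 세지 않기 위해 집합으로 선언
--     # 지울 부분을 erasePoint에 추가
--     for i in range(n-1):
--         for j in range(m-1):
--             if board[i][j].isalpha() and board[i][j] == board[i][j+1] == board[i+1][j] == board[i+1][j+1]:
--                 erasePoint.add((i, j))
--                 erasePoint.add((i, j+1))
--                 erasePoint.add((i+1, j))
--                 erasePoint.add((i+1, j+1))
--
--     # 더이상 지울 부분이 없으면 리턴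
--     if len(erasePoint) == 0:
--         return cnt
--
--     # 지울 부분을 0으로 바꿔줌
--     for y, x in erasePoint:
--         board[y][x] = '0'
--
--     # 지운 부분을 메꿈
--     board = dropBlock(board)
--
--     # 지울 부분이 없을 때까지 재귀
--     return find4Block(m, n, board, len(erasePoint) + cnt)
--
-- def dropBlock(board):
--     board = [(line.count('0')) * '0' + "".join(line).replace("0", "") for line in board]
--     board = [list(line) for line in board]
--     return board
-- ===== SOURCE B (Python) =====
-- # B: iterative rounds; per-cell membership test replaces the window-marking set,
-- # and the gravity step keeps non-'0' cells and pads with '0' instead of join/replace.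
-- # (A mutates the caller's board in place on the first round; B does not — the
-- # equivalence claimed is about the return value only.)
--
-- def _hit(m, n, board, i, j):
--     # is cell (i, j) a corner of some matched 2x2 window?
--     for a in (i - 1, i):
--         for b in (j - 1, j):
--             if 0 <= a < n - 1 and 0 <= b < m - 1:
--                 v = board[a][b]
--                 if v.isalpha() and v == board[a][b + 1] == board[a + 1][b] == board[a + 1][b + 1]:
--                     return True
--     return False
--
--
-- def _collapse(row):
--     keep = [c for c in row if c != '0']
--     return ['0'] * (len(row) - len(keep)) + keep
--
--
-- def find4Block(m, n, board, cnt):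
--     while True:
--         hits = [[_hit(m, n, board, i, j) for j in range(len(row))]
--                 for i, row in enumerate(board)]
--         k = sum(hrow.count(True) for hrow in hits)
--         if k == 0:
--             return cnt
--         cnt += k
--         board = [_collapse(['0' if h else c for c, h in zip(row, hrow)])
--                  for row, hrow in zip(board, hits)]
-- ===== Notes on version B (the rewrite author's own statement) =====
-- stated objective: alternative
-- what changed: A's recursive driver that marks matched 2x2 windows into a set, writes '0' through it and drops blocks with count/join/replace string surgery is replaced by an iterative while-loop that tests each cell for membership in some matched window, counts the hit cells directly, and compacts each row by filtering the non-'0' cells and padding with '0' in front.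
-- outside the precondition, e.g. on find4Block(4, 2, [['b', 'b', 'aa', 'x'], ['b', 'b', 'aa', 'x']], 0): A returns 8, B returns 4
import Mathlib
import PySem

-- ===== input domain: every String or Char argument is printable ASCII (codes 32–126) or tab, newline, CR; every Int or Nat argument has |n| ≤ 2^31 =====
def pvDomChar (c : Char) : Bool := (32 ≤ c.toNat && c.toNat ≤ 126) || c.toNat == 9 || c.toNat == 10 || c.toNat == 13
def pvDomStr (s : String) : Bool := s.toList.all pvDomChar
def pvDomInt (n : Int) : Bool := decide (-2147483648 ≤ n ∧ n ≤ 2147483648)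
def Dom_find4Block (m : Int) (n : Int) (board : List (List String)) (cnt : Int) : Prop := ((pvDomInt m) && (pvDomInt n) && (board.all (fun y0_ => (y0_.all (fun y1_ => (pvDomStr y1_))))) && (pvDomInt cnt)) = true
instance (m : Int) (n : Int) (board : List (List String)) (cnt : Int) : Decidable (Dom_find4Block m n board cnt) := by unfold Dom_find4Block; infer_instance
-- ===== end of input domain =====

-- B replaces A's recursion + window-marking set + join/replace gravity by an iterative
-- driver with a per-cell membership test and a filter/pad gravity step; A mutates the
-- caller's board in place on the first round, B does not — the claim is about the
-- return value only.

-- ===== PORT A =====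

-- board[i][j], total form (Pre_ keeps every executed access in range)
def cellAt (board : List (List String)) (i j : Int) : String :=
  PySem.List.pyGetD (PySem.List.pyGetD board i []) j ""

-- board[i][j].isalpha() and board[i][j] == board[i][j+1] == board[i+1][j] == board[i+1][j+1]
def winHit (board : List (List String)) (i j : Int) : Bool :=
  PySem.Str.strIsalpha (cellAt board i j) &&
  (cellAt board i j == cellAt board i (j+1)) &&
  (cellAt board i (j+1) == cellAt board (i+1) j) &&
  (cellAt board (i+1) j == cellAt board (i+1) (j+1))

-- the erasePoint set of A, built by the two nested for-loops
def eraseSetA (m n : Int) (board : List (List String)) : PySem.Set (Int × Int) :=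
  (PySem.List.pyRange 0 (n-1) 1).foldl (fun s i =>
    (PySem.List.pyRange 0 (m-1) 1).foldl (fun s j =>
      if winHit board i j then
        PySem.Set.add (PySem.Set.add (PySem.Set.add (PySem.Set.add s (i, j)) (i, j+1)) (i+1, j)) (i+1, j+1)
      else s) s) PySem.Set.empty

-- board[y][x] = '0'
def setZero (board : List (List String)) (y x : Int) : List (List String) :=
  PySem.List.pySetD board y (PySem.List.pySetD (PySem.List.pyGetD board y []) x "0")

-- dropBlock: line.count('0') * '0' + "".join(line).replace("0", ""), then list(line)
-- (strings are ported at the List Char level; list(str) yields 1-char strings)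
def dropBlockA (board : List (List String)) : List (List String) :=
  let b1 : List (List Char) := board.map (fun line =>
    List.replicate (PySem.List.count line "0") '0' ++
      PySem.Chars.replace (PySem.Chars.join [] (line.map String.toList)) ['0'] [])
  b1.map (fun line => line.map (fun c => String.ofList [c]))

-- termination measure: number of characters other than '0' on the board
def muCell (s : String) : Nat := (s.toList.filter (fun c => c ≠ '0')).length
def muRow (row : List String) : Nat := (row.map muCell).sum
def mu (board : List (List String)) : Nat := (board.map muRow).sum

theorem mem_inner (board : List (List String)) (i : Int) (js : List Int)
    (s : PySem.Set (Int × Int)) (q : Int × Int) :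
    q ∈ js.foldl (fun s j =>
      if winHit board i j then
        PySem.Set.add (PySem.Set.add (PySem.Set.add (PySem.Set.add s (i, j)) (i, j+1)) (i+1, j)) (i+1, j+1)
      else s) s ↔
    q ∈ s ∨ ∃ j ∈ js, winHit board i j = true ∧
      (q = (i,j) ∨ q = (i,j+1) ∨ q = (i+1,j) ∨ q = (i+1,j+1)) := by
  induction js generalizing s with
  | nil => simp
  | cons j js ih =>
    simp only [List.foldl_cons, ih]
    by_cases hw : winHit board i j
    · simp only [hw, if_true, PySem.Set.mem_add]
      constructor
      · rintro (((((hs | ha) | hb) | hc) | hd) | ⟨j', hj', hw', hc⟩)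
        · tauto
        · exact Or.inr ⟨j, List.mem_cons_self, hw, by tauto⟩
        · exact Or.inr ⟨j, List.mem_cons_self, hw, by tauto⟩
        · exact Or.inr ⟨j, List.mem_cons_self, hw, by tauto⟩
        · exact Or.inr ⟨j, List.mem_cons_self, hw, by tauto⟩
        · exact Or.inr ⟨j', List.mem_cons_of_mem _ hj', hw', hc⟩
      · rintro (h | ⟨j', hj', hw', hc⟩)
        · tauto
        · rcases List.mem_cons.mp hj' with h | h
          · subst h; tauto
          · exact Or.inr ⟨j', h, hw', hc⟩
    · simp only [hw, Bool.false_eq_true, if_false]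
      constructor
      · rintro (h | ⟨j', hj', rest⟩)
        · exact Or.inl h
        · exact Or.inr ⟨j', List.mem_cons_of_mem _ hj', rest⟩
      · rintro (h | ⟨j', hj', hw', hc⟩)
        · tauto
        · rcases List.mem_cons.mp hj' with h | h
          · subst h; simp [hw] at hw'
          · exact Or.inr ⟨j', h, hw', hc⟩

theorem mem_eraseSetA_iff (m n : Int) (board : List (List String)) (q : Int × Int) :
    q ∈ eraseSetA m n board ↔ ∃ i j, 0 ≤ i ∧ i < n-1 ∧ 0 ≤ j ∧ j < m-1 ∧
      winHit board i j = true ∧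
      (q = (i,j) ∨ q = (i,j+1) ∨ q = (i+1,j) ∨ q = (i+1,j+1)) := by
  unfold eraseSetA
  have houter : ∀ (is : List Int) (s : PySem.Set (Int × Int)),
      q ∈ is.foldl (fun s i => (PySem.List.pyRange 0 (m-1) 1).foldl (fun s j =>
        if winHit board i j then
          PySem.Set.add (PySem.Set.add (PySem.Set.add (PySem.Set.add s (i, j)) (i, j+1)) (i+1, j)) (i+1, j+1)
        else s) s) s ↔
      q ∈ s ∨ ∃ i ∈ is, ∃ j ∈ PySem.List.pyRange 0 (m-1) 1, winHit board i j = true ∧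
        (q = (i,j) ∨ q = (i,j+1) ∨ q = (i+1,j) ∨ q = (i+1,j+1)) := by
    intro is
    induction is with
    | nil => simp
    | cons i is ih =>
      intro s
      simp only [List.foldl_cons, ih, mem_inner]
      constructor
      · rintro ((h | hex) | ⟨i', hi', rest⟩)
        · tauto
        · exact Or.inr ⟨i, List.mem_cons_self, hex⟩
        · exact Or.inr ⟨i', List.mem_cons_of_mem _ hi', rest⟩
      · rintro (h | ⟨i', hi', rest⟩)
        · tauto
        · rcases List.mem_cons.mp hi' with h | h
          · subst h; exact Or.inl (Or.inr rest)
          · exact Or.inr ⟨i', h, rest⟩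
  rw [houter]
  simp only [PySem.Set.empty, List.not_mem_nil, false_or, PySem.List.mem_pyRange_one]
  constructor
  · rintro ⟨i, ⟨hi0, hi1⟩, j, ⟨hj0, hj1⟩, rest⟩
    exact ⟨i, j, hi0, hi1, hj0, hj1, rest⟩
  · rintro ⟨i, j, hi0, hi1, hj0, hj1, rest⟩
    exact ⟨i, ⟨hi0, hi1⟩, j, ⟨hj0, hj1⟩, rest⟩

theorem corner_alpha {board : List (List String)} {i j : Int}
    (hw : winHit board i j = true) :
    PySem.Str.strIsalpha (cellAt board i j) = true ∧
    PySem.Str.strIsalpha (cellAt board i (j+1)) = true ∧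
    PySem.Str.strIsalpha (cellAt board (i+1) j) = true ∧
    PySem.Str.strIsalpha (cellAt board (i+1) (j+1)) = true := by
  unfold winHit at hw
  simp only [Bool.and_eq_true, beq_iff_eq] at hw
  obtain ⟨⟨⟨ha, h1⟩, h2⟩, h3⟩ := hw
  refine ⟨ha, ?_, ?_, ?_⟩
  · rw [← h1]; exact ha
  · rw [← h2, ← h1]; exact ha
  · rw [← h3, ← h2, ← h1]; exact ha

theorem alpha_of_mem_eraseSetA {m n : Int} {board : List (List String)} {q : Int × Int}
    (h : q ∈ eraseSetA m n board) :
    0 ≤ q.1 ∧ 0 ≤ q.2 ∧ PySem.Str.strIsalpha (cellAt board q.1 q.2) = true := by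
  rw [mem_eraseSetA_iff] at h
  obtain ⟨i, j, hi0, _, hj0, _, hw, hc⟩ := h
  obtain ⟨a1, a2, a3, a4⟩ := corner_alpha hw
  rcases hc with h | h | h | h <;> subst h <;>
    exact ⟨by omega, by omega, by assumption⟩

theorem sum_map_set_le {α : Type} (f : α → Nat) :
    ∀ (l : List α) (k : Nat) (v : α), (∀ (hk : k < l.length), f v ≤ f l[k]) →
      ((l.set k v).map f).sum ≤ (l.map f).sum := by
  intro l
  induction l with
  | nil => intro k v _; simp
  | cons x xs ih =>
    intro k v hv
    cases k with
    | zero =>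
      simp only [List.set_cons_zero, List.map_cons, List.sum_cons]
      exact Nat.add_le_add_right (by simpa using hv (by simp)) _
    | succ k =>
      simp only [List.set_cons_succ, List.map_cons, List.sum_cons]
      exact Nat.add_le_add_left (ih k v (fun hk => by simpa using hv (by simpa using Nat.succ_lt_succ hk))) _

theorem sum_map_set_lt {α : Type} (f : α → Nat) :
    ∀ (l : List α) (k : Nat) (v : α) (hk : k < l.length), f v < f l[k] →
      ((l.set k v).map f).sum < (l.map f).sum := by
  intro l
  induction l with
  | nil => intro k v hk; simp at hk
  | cons x xs ih =>
    intro k v hk hv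
    cases k with
    | zero =>
      simp only [List.set_cons_zero, List.map_cons, List.sum_cons]
      exact Nat.add_lt_add_right (by simpa using hv) _
    | succ k =>
      simp only [List.set_cons_succ, List.map_cons, List.sum_cons]
      exact Nat.add_lt_add_left (ih k v (by simpa using Nat.succ_lt_succ_iff.mp (by simpa using hk)) (by simpa using hv)) _

theorem muCell_zero : muCell "0" = 0 := by decide

theorem one_le_muCell_of_alpha {s : String} (ha : PySem.Str.strIsalpha s = true) :
    1 ≤ muCell s := by
  have : PySem.Chars.strIsalpha s.toList = true := ha
  unfold PySem.Chars.strIsalpha at this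
  simp only [Bool.and_eq_true, List.all_eq_true] at this
  obtain ⟨hne, hall⟩ := this
  unfold muCell
  cases hs : s.toList with
  | nil => rw [hs] at hne; simp at hne
  | cons c t =>
    rw [hs] at hall
    have hc : PySem.Chars.isalpha c = true := hall c (by simp)
    have : c ≠ '0' := by rintro rfl; simp at hc; revert hc; decide
    simp [this]

theorem alpha_in_range {board : List (List String)} {y x : Int}
    (hy : 0 ≤ y) (hx : 0 ≤ x)
    (ha : PySem.Str.strIsalpha (cellAt board y x) = true) :
    ∃ (h1 : y.toNat < board.length), x.toNat < board[y.toNat].length := by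
  unfold cellAt at ha
  rw [PySem.List.pyGetD_of_nonneg _ _ hy, PySem.List.pyGetD_of_nonneg _ _ hx] at ha
  by_cases h1 : y.toNat < board.length
  · refine ⟨h1, ?_⟩
    by_cases h2 : x.toNat < board[y.toNat].length
    · exact h2
    · rw [List.getD_eq_getElem board [] h1] at ha
      rw [List.getD_eq_default _ _ (by omega)] at ha
      exact absurd ha (by decide)
  · rw [List.getD_eq_default board _ (by omega)] at ha
    simp at ha
    exact absurd ha (by decide)

theorem cellAt_eq_getElem {board : List (List String)} {y x : Int}
    (hy : 0 ≤ y) (hx : 0 ≤ x) (h1 : y.toNat < board.length) (h2 : x.toNat < board[y.toNat].length) :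
    cellAt board y x = board[y.toNat][x.toNat] := by
  unfold cellAt
  rw [PySem.List.pyGetD_of_nonneg _ _ hy, PySem.List.pyGetD_of_nonneg _ _ hx,
    List.getD_eq_getElem board [] h1, List.getD_eq_getElem _ _ h2]

theorem setZero_eq_set {board : List (List String)} {y x : Int} (hy : 0 ≤ y) (hx : 0 ≤ x) :
    setZero board y x = board.set y.toNat ((board.getD y.toNat []).set x.toNat "0") := by
  unfold setZero
  rw [PySem.List.pySetD_of_nonneg _ _ hy, PySem.List.pySetD_of_nonneg _ _ hx,
    PySem.List.pyGetD_of_nonneg _ _ hy]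

theorem mu_setZero_le (board : List (List String)) (y x : Int) (hy : 0 ≤ y) (hx : 0 ≤ x) :
    mu (setZero board y x) ≤ mu board := by
  rw [setZero_eq_set hy hx]
  exact sum_map_set_le muRow board y.toNat _ (fun hk => by
    rw [List.getD_eq_getElem board [] hk]
    exact sum_map_set_le muCell _ x.toNat _ (fun _ => by rw [muCell_zero]; exact Nat.zero_le _))

theorem mu_setZero_lt (board : List (List String)) (y x : Int) (hy : 0 ≤ y) (hx : 0 ≤ x)
    (ha : PySem.Str.strIsalpha (cellAt board y x) = true) :
    mu (setZero board y x) < mu board := by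
  obtain ⟨h1, h2⟩ := alpha_in_range hy hx ha
  rw [setZero_eq_set hy hx]
  refine sum_map_set_lt muRow board y.toNat _ h1 ?_
  rw [List.getD_eq_getElem board [] h1]
  refine sum_map_set_lt muCell _ x.toNat _ h2 ?_
  rw [muCell_zero]
  have hc : cellAt board y x = board[y.toNat][x.toNat] := cellAt_eq_getElem hy hx h1 h2
  rw [hc] at ha
  exact one_le_muCell_of_alpha ha

theorem mu_foldl_setZero_le (l : List (Int × Int)) (board : List (List String))
    (hl : ∀ p ∈ l, 0 ≤ p.1 ∧ 0 ≤ p.2) :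
    mu (l.foldl (fun b p => setZero b p.1 p.2) board) ≤ mu board := by
  induction l generalizing board with
  | nil => simp
  | cons p l ih =>
    simp only [List.foldl_cons]
    refine le_trans (ih _ (fun q hq => hl q (List.mem_cons_of_mem _ hq))) ?_
    exact mu_setZero_le board p.1 p.2 (hl p (by simp)).1 (hl p (by simp)).2

theorem join_nil_flatten (xs : List (List Char)) : PySem.Chars.join [] xs = xs.flatten := by
  induction xs with
  | nil => rfl
  | cons x xs ih =>
    cases xs with
    | nil => simp [PySem.Chars.join, List.intercalate]
    | cons y ys =>
      rw [PySem.Chars.join_cons_cons]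
      simpa using congrArg (x ++ ·) ih

theorem go_filter (fuel : Nat) : ∀ (l acc : List Char), l.length ≤ fuel →
    PySem.Chars.replace.go ['0'] [] fuel l acc = acc.reverse ++ l.filter (fun c => c ≠ '0') := by
  induction fuel with
  | zero =>
    intro l acc h
    have : l = [] := List.eq_nil_of_length_eq_zero (Nat.le_zero.mp h)
    subst this; simp [PySem.Chars.replace.go]
  | succ f ih =>
    intro l acc h
    match l with
    | [] => simp [PySem.Chars.replace.go]
    | c :: t =>
      rw [PySem.Chars.replace.go]
      by_cases hc : c = '0'
      · subst hc
        have hp : List.isPrefixOf ['0'] ('0' :: t) = true := by simp [List.isPrefixOf]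
        simp only [hp, if_true, List.length_cons, List.drop_succ_cons, List.length_nil,
          List.drop_zero, List.reverse_nil, List.nil_append]
        rw [ih t acc (by simpa using Nat.succ_le_succ_iff.mp h)]
        simp
      · have hp : List.isPrefixOf ['0'] (c :: t) = false := by
          simp [List.isPrefixOf]; exact fun hq => absurd hq.symm hc
        simp only [hp, Bool.false_eq_true, if_false]
        rw [ih t (c :: acc) (by simpa using Nat.succ_le_succ_iff.mp h)]
        simp [hc]

theorem replace_filter (cs : List Char) :
    PySem.Chars.replace cs ['0'] [] = cs.filter (fun c => c ≠ '0') := by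
  rw [PySem.Chars.replace]
  simp [go_filter cs.length cs [] (le_refl _)]

theorem muCell_singleton (c : Char) : muCell (String.ofList [c]) = if c = '0' then 0 else 1 := by
  unfold muCell
  by_cases hc : c = '0' <;> simp [hc]

theorem muRow_map_singleton (cs : List Char) :
    muRow (cs.map (fun c => String.ofList [c])) = (cs.filter (fun c => c ≠ '0')).length := by
  induction cs with
  | nil => rfl
  | cons c cs ih =>
    unfold muRow at ih ⊢
    simp only [List.map_map] at ih
    simp only [List.map_cons, List.sum_cons, List.filter_cons, List.map_map, muCell_singleton]
    by_cases hc : c = '0' <;> simp [hc, ih] <;> omega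

theorem muRow_eq_flatten (row : List String) :
    muRow row = ((row.map String.toList).flatten.filter (fun c => c ≠ '0')).length := by
  induction row with
  | nil => rfl
  | cons c row ih =>
    unfold muRow at ih ⊢
    simp [List.filter_append, ih, muCell]

theorem mu_dropBlockA (board : List (List String)) : mu (dropBlockA board) = mu board := by
  unfold dropBlockA mu
  simp only [List.map_map]
  congr 1
  apply List.map_congr_left
  intro row _
  simp only [Function.comp]
  rw [muRow_map_singleton, join_nil_flatten, replace_filter, muRow_eq_flatten]
  rw [List.filter_append, List.filter_filter]
  simp [List.filter_replicate]

theorem muA_decreases (m n : Int) (board : List (List String))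
    (h : eraseSetA m n board ≠ []) :
    mu (dropBlockA ((eraseSetA m n board).foldl (fun b p => setZero b p.1 p.2) board)) < mu board := by
  rw [mu_dropBlockA]
  obtain ⟨p, rest, hS⟩ : ∃ p rest, eraseSetA m n board = p :: rest := by
    cases hS : eraseSetA m n board with
    | nil => exact absurd hS h
    | cons p rest => exact ⟨p, rest, rfl⟩
  have hp := alpha_of_mem_eraseSetA (m := m) (n := n) (q := p) (by rw [hS]; simp)
  rw [hS]
  simp only [List.foldl_cons]
  refine lt_of_le_of_lt (mu_foldl_setZero_le rest _ ?_) ?_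
  · intro q hq
    have := alpha_of_mem_eraseSetA (m := m) (n := n) (q := q)
      (by rw [hS]; exact List.mem_cons_of_mem _ hq)
    exact ⟨this.1, this.2.1⟩
  · exact mu_setZero_lt board p.1 p.2 hp.1 hp.2.1 hp.2.2

def find4Block (m : Int) (n : Int) (board : List (List String)) (cnt : Int) : Int :=
  let ep := eraseSetA m n board
  if PySem.Set.len ep = 0 then cnt
  else
    find4Block m n (dropBlockA (ep.foldl (fun b p => setZero b p.1 p.2) board))
      (PySem.Set.len ep + cnt)
termination_by mu board
decreasing_by
  exact muA_decreases m n board (by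
    intro hnil
    exact absurd (by simp [hnil, PySem.Set.len]) ‹¬ PySem.Set.len (eraseSetA m n board) = 0›)

-- ===== PORT B =====

-- _hit: early-return double loop over the 2x2 windows that contain (i, j)
def hitB (m n : Int) (board : List (List String)) (i j : Int) : Bool :=
  [i-1, i].any (fun a => [j-1, j].any (fun b =>
    (decide (0 ≤ a) && decide (a < n-1) && decide (0 ≤ b) && decide (b < m-1)) &&
      winHit board a b))

-- _collapse: keep the non-'0' cells, pad with '0' in front
def collapseB (row : List String) : List String :=
  let keep := row.filter (fun c => c ≠ "0")
  List.replicate (row.length - keep.length) "0" ++ keep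

theorem muRow_filter_zero (row : List String) :
    muRow (row.filter (fun c => c ≠ "0")) = muRow row := by
  induction row with
  | nil => rfl
  | cons c row ih =>
    unfold muRow at ih ⊢
    by_cases hc : c = "0"
    · subst hc; simpa [muCell_zero] using ih
    · rw [List.filter_cons_of_pos (by simp [hc])]
      simp only [List.map_cons, List.sum_cons, ih]

theorem muRow_append (r1 r2 : List String) : muRow (r1 ++ r2) = muRow r1 + muRow r2 := by
  unfold muRow; simp

theorem muRow_replicate_zero (k : Nat) : muRow (List.replicate k "0") = 0 := by
  unfold muRow
  simp [List.map_replicate, muCell_zero]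

theorem muRow_collapse (row : List String) : muRow (collapseB row) = muRow row := by
  unfold collapseB
  rw [muRow_append, muRow_replicate_zero, muRow_filter_zero]
  omega

theorem muRow_mask_le (r : List String) (h : List Bool) :
    muRow ((r.zip h).map (fun p => if p.2 then "0" else p.1)) ≤ muRow r := by
  induction r generalizing h with
  | nil => simp [muRow]
  | cons c r ih =>
    cases h with
    | nil => simp [muRow]
    | cons b h =>
      simp only [List.zip_cons_cons, List.map_cons]
      unfold muRow
      simp only [List.map_cons, List.sum_cons]
      have hle := ih h
      unfold muRow at hle
      cases b
      · simp only [Bool.false_eq_true, if_false]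
        omega
      · simp only [if_true, muCell_zero]
        omega

theorem muRow_mask_lt (r : List String) (h : List Bool) (j : Nat)
    (hj : j < r.length) (hjh : j < h.length) (hh : h[j] = true)
    (ha : PySem.Str.strIsalpha r[j] = true) :
    muRow ((r.zip h).map (fun p => if p.2 then "0" else p.1)) < muRow r := by
  induction r generalizing h j with
  | nil => simp at hj
  | cons c r ih =>
    cases h with
    | nil => simp at hjh
    | cons b h =>
      simp only [List.zip_cons_cons, List.map_cons]
      unfold muRow
      simp only [List.map_cons, List.sum_cons]
      cases j with
      | zero =>
        simp only [List.getElem_cons_zero] at hh ha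
        subst hh
        simp only [if_true, muCell_zero]
        have h1 := one_le_muCell_of_alpha ha
        have h2 := muRow_mask_le r h
        unfold muRow at h2
        omega
      | succ j =>
        simp only [List.getElem_cons_succ] at hh ha
        have := ih h j (by simpa using Nat.succ_lt_succ_iff.mp hj)
          (by simpa using Nat.succ_lt_succ_iff.mp hjh) hh ha
        unfold muRow at this
        cases b
        · simp only [Bool.false_eq_true, if_false]
          omega
        · simp only [if_true, muCell_zero]
          omega

theorem mu_mask_le (b : List (List String)) (hs : List (List Bool)) :
    mu ((b.zip hs).map (fun rh =>
      collapseB ((rh.1.zip rh.2).map (fun p => if p.2 then "0" else p.1)))) ≤ mu b := by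
  induction b generalizing hs with
  | nil => simp [mu]
  | cons r b ih =>
    cases hs with
    | nil => simp [mu]
    | cons h hs =>
      simp only [List.zip_cons_cons, List.map_cons]
      unfold mu
      simp only [List.map_cons, List.sum_cons]
      have h1 : muRow (collapseB ((r.zip h).map (fun p => if p.2 then "0" else p.1))) ≤ muRow r := by
        rw [muRow_collapse]; exact muRow_mask_le r h
      have h2 := ih hs
      unfold mu at h2
      omega

theorem mu_mask_lt (b : List (List String)) (hs : List (List Bool)) (i : Nat)
    (hi : i < b.length) (hih : i < hs.length)
    (hrow : muRow ((b[i].zip hs[i]).map (fun p => if p.2 then "0" else p.1)) < muRow b[i]) :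
    mu ((b.zip hs).map (fun rh =>
      collapseB ((rh.1.zip rh.2).map (fun p => if p.2 then "0" else p.1)))) < mu b := by
  induction b generalizing hs i with
  | nil => simp at hi
  | cons r b ih =>
    cases hs with
    | nil => simp at hih
    | cons h hs =>
      simp only [List.zip_cons_cons, List.map_cons]
      unfold mu
      simp only [List.map_cons, List.sum_cons]
      cases i with
      | zero =>
        simp only [List.getElem_cons_zero] at hrow
        have h1 : muRow (collapseB ((r.zip h).map (fun p => if p.2 then "0" else p.1))) < muRow r := by
          rw [muRow_collapse]; exact hrow
        have h2 := mu_mask_le b hs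
        unfold mu at h2
        omega
      | succ i =>
        simp only [List.getElem_cons_succ] at hrow
        have h1 : muRow (collapseB ((r.zip h).map (fun p => if p.2 then "0" else p.1))) ≤ muRow r := by
          rw [muRow_collapse]; exact muRow_mask_le r h
        have h2 := ih hs i (by simpa using Nat.succ_lt_succ_iff.mp hi)
          (by simpa using Nat.succ_lt_succ_iff.mp hih) hrow
        unfold mu at h2
        omega

theorem hitB_iff (m n : Int) (board : List (List String)) (i j : Int) :
    hitB m n board i j = true ↔ ∃ a b, (a = i-1 ∨ a = i) ∧ (b = j-1 ∨ b = j) ∧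
      0 ≤ a ∧ a < n-1 ∧ 0 ≤ b ∧ b < m-1 ∧ winHit board a b = true := by
  unfold hitB
  simp only [List.any_eq_true, List.mem_cons, List.not_mem_nil, or_false,
    Bool.and_eq_true, decide_eq_true_eq]
  constructor
  · rintro ⟨a, ha, b, hb, ⟨⟨⟨h1, h2⟩, h3⟩, h4⟩, hw⟩
    exact ⟨a, b, ha, hb, h1, h2, h3, h4, hw⟩
  · rintro ⟨a, b, ha, hb, h1, h2, h3, h4, hw⟩
    exact ⟨a, ha, b, hb, ⟨⟨⟨h1, h2⟩, h3⟩, h4⟩, hw⟩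

theorem alpha_of_hitB {m n : Int} {board : List (List String)} {i j : Int}
    (h : hitB m n board i j = true) :
    PySem.Str.strIsalpha (cellAt board i j) = true := by
  rw [hitB_iff] at h
  obtain ⟨a, b, ha, hb, _, _, _, _, hw⟩ := h
  obtain ⟨a1, a2, a3, a4⟩ := corner_alpha hw
  rcases ha with ha | ha <;> rcases hb with hb | hb
  · have hia : i = a + 1 := by omega
    have hjb : j = b + 1 := by omega
    rw [hia, hjb]; exact a4
  · have hia : i = a + 1 := by omega
    rw [hia, ← hb]; exact a3
  · have hjb : j = b + 1 := by omega
    rw [← ha, hjb]; exact a2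
  · rw [← ha, ← hb]; exact a1

theorem muB_decreases (m n : Int) (board : List (List String))
    (hits : List (List Bool))
    (hhits : hits = (PySem.List.enumerate board 0).map (fun p =>
      (PySem.List.enumerate p.2 0).map (fun q => hitB m n board p.1 q.1)))
    (hk : ¬ ((hits.map (fun hrow => (PySem.List.count hrow true : Int))).sum = 0)) :
    mu ((board.zip hits).map (fun rh =>
      collapseB ((rh.1.zip rh.2).map (fun p => if p.2 then "0" else p.1)))) < mu board := by
  -- find a hit
  have hlen : hits.length = board.length := by
    rw [hhits]; simp [PySem.List.length_enumerate]
  obtain ⟨hrow, hmem, hcnt⟩ : ∃ hrow ∈ hits, PySem.List.count hrow true ≠ 0 := by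
    by_contra hall
    push Not at hall
    exact hk (List.sum_eq_zero (by
      intro x hx
      obtain ⟨hrow, hmem, rfl⟩ := List.mem_map.mp hx
      have h0 : List.count true hrow = 0 := hall hrow hmem
      simp [h0]))
  obtain ⟨i, hi, rfl⟩ := List.mem_iff_getElem.mp hmem
  have htrue : true ∈ hits[i] := by
    rw [← List.count_pos_iff]
    have : PySem.List.count hits[i] true = List.count true hits[i] := rfl
    omega
  obtain ⟨j, hj, hh⟩ := List.mem_iff_getElem.mp htrue
  -- unpack the structure of hits
  have hi' : i < board.length := by omega
  have hrow_eq : hits[i] = (PySem.List.enumerate board[i] 0).map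
      (fun q => hitB m n board ((i : Int)) q.1) := by
    subst hhits
    simp [PySem.List.getElem_enumerate]
  have hj' : j < board[i].length := by
    rw [hrow_eq] at hj
    simpa [PySem.List.length_enumerate] using hj
  have hhit : hitB m n board (i : Int) (j : Int) = true := by
    have e1 := List.getElem_of_eq hrow_eq hj
    rw [List.getElem_map] at e1
    rw [e1] at hh
    simpa [PySem.List.getElem_enumerate] using hh
  -- the hit cell is alphabetic
  have halpha : PySem.Str.strIsalpha board[i][j] = true := by
    have := alpha_of_hitB hhit
    rwa [cellAt_eq_getElem (by omega) (by omega) (by simpa using hi') (by simpa using hj')] at this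
  -- strict decrease on row i
  apply mu_mask_lt board hits i hi' (by omega)
  apply muRow_mask_lt _ _ j hj' (by omega) hh halpha

def find4Block_alt (m : Int) (n : Int) (board : List (List String)) (cnt : Int) : Int :=
  let hits : List (List Bool) := (PySem.List.enumerate board 0).map (fun p =>
    (PySem.List.enumerate p.2 0).map (fun q => hitB m n board p.1 q.1))
  let k : Int := (hits.map (fun hrow => (PySem.List.count hrow true : Int))).sum
  if k = 0 then cnt
  else
    find4Block_alt m n
      ((board.zip hits).map (fun rh =>
        collapseB ((rh.1.zip rh.2).map (fun p => if p.2 then "0" else p.1))))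
      (cnt + k)
termination_by mu board
decreasing_by
  exact muB_decreases m n board _ rfl ‹_›

-- ===== PRECONDITION & SPEC =====
-- Pre_ excludes, when n ≥ 2 and m ≥ 2, boards smaller than n×m (A raises IndexError
-- there) and boards containing a cell that is not a single character (A's
-- join/replace gravity re-splits such cells into single characters mid-game, an
-- artefact of its string representation, so A's value there is accidental).
def Pre_find4Block (m : Int) (n : Int) (board : List (List String)) (cnt : Int) : Prop :=
  n ≤ 1 ∨ m ≤ 1 ∨
    (n ≤ (board.length : Int) ∧
      (∀ row ∈ board.take n.toNat, m ≤ (row.length : Int)) ∧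
      (∀ row ∈ board, ∀ c ∈ row, c.toList.length = 1))
instance (m : Int) (n : Int) (board : List (List String)) (cnt : Int) : Decidable (Pre_find4Block m n board cnt) := by unfold Pre_find4Block; infer_instance

def pvWitness_find4Block : Int × Int × List (List String) × Int :=
  (2, 2, [["a", "a"], ["a", "a"]], 0)

def Spec_find4Block (m : Int) (n : Int) (board : List (List String)) (cnt : Int) (out : Int) : Prop := out = find4Block_alt m n board cnt
instance (m : Int) (n : Int) (board : List (List String)) (cnt : Int) (out : Int) : Decidable (Spec_find4Block m n board cnt out) := by unfold Spec_find4Block; infer_instance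

-- ===== CLAIM (what is proved, stated in full; the proofs are below) =====
def Claim_equal_find4Block : Prop := ∀ (m : Int) (n : Int) (board : List (List String)) (cnt : Int), Dom_find4Block m n board cnt → Pre_find4Block m n board cnt → Spec_find4Block m n board cnt (find4Block m n board cnt)

-- ===== LEMMAS AND PROOFS =====

-- membership in the erase set is exactly the per-cell test of B
theorem mem_eraseSetA_iff_hitB (m n : Int) (board : List (List String)) (q : Int × Int) :
    q ∈ eraseSetA m n board ↔ hitB m n board q.1 q.2 = true := by
  rw [mem_eraseSetA_iff, hitB_iff]
  constructor
  · rintro ⟨i, j, hi0, hi1, hj0, hj1, hw, hc⟩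
    rcases hc with rfl | rfl | rfl | rfl
    · exact ⟨i, j, Or.inr rfl, Or.inr rfl, hi0, hi1, hj0, hj1, hw⟩
    · exact ⟨i, j, Or.inr rfl, Or.inl (by simp), hi0, hi1, hj0, hj1, hw⟩
    · exact ⟨i, j, Or.inl (by simp), Or.inr rfl, hi0, hi1, hj0, hj1, hw⟩
    · exact ⟨i, j, Or.inl (by simp), Or.inl (by simp), hi0, hi1, hj0, hj1, hw⟩
  · rintro ⟨a, b, ha, hb, h1, h2, h3, h4, hw⟩
    refine ⟨a, b, h1, h2, h3, h4, hw, ?_⟩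
    have hq : q = (q.1, q.2) := rfl
    rcases ha with ha | ha <;> rcases hb with hb | hb
    · have : q = (a+1, b+1) := by rw [hq, Prod.mk.injEq]; omega
      tauto
    · have : q = (a+1, b) := by rw [hq, Prod.mk.injEq]; omega
      tauto
    · have : q = (a, b+1) := by rw [hq, Prod.mk.injEq]; omega
      tauto
    · have : q = (a, b) := by rw [hq, Prod.mk.injEq]; omega
      tauto

theorem eraseSetA_nil_of_small (m n : Int) (board : List (List String))
    (h : n ≤ 1 ∨ m ≤ 1) : eraseSetA m n board = [] := by
  rw [List.eq_nil_iff_forall_not_mem]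
  intro q hq
  rw [mem_eraseSetA_iff] at hq
  obtain ⟨i, j, hi0, hi1, hj0, hj1, _⟩ := hq
  omega

-- the k of B is zero iff no cell is hit
theorem count_true_eq_countP (hrow : List Bool) :
    PySem.List.count hrow true = hrow.countP (fun b => b) := by
  unfold PySem.List.count
  rw [List.count_eq_countP]
  apply List.countP_congr
  intro b _
  cases b <;> simp

theorem nodup_eraseSetA (m n : Int) (board : List (List String)) :
    (eraseSetA m n board).Nodup := by
  unfold eraseSetA
  have hstep : ∀ (is : List Int) (s : PySem.Set (Int × Int)), s.Nodup →
      (is.foldl (fun s i => (PySem.List.pyRange 0 (m-1) 1).foldl (fun s j =>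
        if winHit board i j then
          PySem.Set.add (PySem.Set.add (PySem.Set.add (PySem.Set.add s (i, j)) (i, j+1)) (i+1, j)) (i+1, j+1)
        else s) s) s).Nodup := by
    intro is
    induction is with
    | nil => intro s hs; exact hs
    | cons i is ih =>
      intro s hs
      simp only [List.foldl_cons]
      apply ih
      have hinner : ∀ (js : List Int) (s : PySem.Set (Int × Int)), s.Nodup →
          (js.foldl (fun s j =>
            if winHit board i j then
              PySem.Set.add (PySem.Set.add (PySem.Set.add (PySem.Set.add s (i, j)) (i, j+1)) (i+1, j)) (i+1, j+1)
            else s) s).Nodup := by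
        intro js
        induction js with
        | nil => intro s hs; exact hs
        | cons j js ihj =>
          intro s hs
          simp only [List.foldl_cons]
          apply ihj
          by_cases hw : winHit board i j
          · simp only [hw, if_true]
            exact PySem.Set.nodup_add _ _ (PySem.Set.nodup_add _ _ (PySem.Set.nodup_add _ _ (PySem.Set.nodup_add _ _ hs)))
          · simpa [hw] using hs
      exact hinner _ s hs
  exact hstep _ _ (by simp [PySem.Set.empty])

-- list of all (row, column) index pairs of the board, rows starting at s
def posOf : List (List String) → Int → List (Int × Int)
  | [], _ => []
  | r :: rs, s => ((PySem.List.enumerate r 0).map (fun q => (s, q.1))) ++ posOf rs (s + 1)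

theorem mem_posOf (b : List (List String)) (s : Int) (q : Int × Int) :
    q ∈ posOf b s ↔ ∃ (i : Nat) (j : Nat), ∃ (hi : i < b.length),
      j < b[i].length ∧ q = (s + i, (j : Int)) := by
  induction b generalizing s with
  | nil => simp [posOf]
  | cons r rs ih =>
    simp only [posOf, List.mem_append, List.mem_map, PySem.List.mem_enumerate_iff, ih]
    constructor
    · rintro (⟨p, ⟨k, hk, rfl⟩, rfl⟩ | ⟨i, j, hi, hj, rfl⟩)
      · exact ⟨0, k, by simp, by simpa using hk, by simp⟩
      · exact ⟨i + 1, j, by simpa using Nat.succ_lt_succ hi, by simpa using hj, by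
          simp; omega⟩
    · rintro ⟨i, j, hi, hj, rfl⟩
      cases i with
      | zero =>
        exact Or.inl ⟨(0 + (j:Int), r[j]'(by simpa using hj)), ⟨j, by simpa using hj, rfl⟩, by simp⟩
      | succ i =>
        refine Or.inr ⟨i, j, by simpa using Nat.succ_lt_succ_iff.mp hi, by simpa using hj, ?_⟩
        simp; omega

theorem nodup_posOf (b : List (List String)) (s : Int) : (posOf b s).Nodup := by
  induction b generalizing s with
  | nil => simp [posOf]
  | cons r rs ih =>
    simp only [posOf]
    apply List.Nodup.append
    · apply List.Nodup.map_on
      · rintro p hp p' hp' he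
        rw [PySem.List.mem_enumerate_iff] at hp hp'
        obtain ⟨k, hk, rfl⟩ := hp
        obtain ⟨k', hk', rfl⟩ := hp'
        have hkk : (k : Int) = (k' : Int) := by simpa using he
        have : k = k' := by exact_mod_cast hkk
        subst this; rfl
      · -- enumerate has strictly increasing first components, hence nodup
        have := PySem.List.pairwise_lt_enumerate r 0
        exact this.imp (fun h => by intro he; rw [he] at h; exact lt_irrefl _ h)
    · exact ih (s + 1)
    · intro q hq hq'
      rw [List.mem_map] at hq
      rw [mem_posOf] at hq'
      obtain ⟨p, _, rfl⟩ := hq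
      obtain ⟨i, j, hi, hj, he⟩ := hq'
      have : s = s + 1 + i := congrArg Prod.fst he
      omega


theorem sum_map_natCast (l : List Nat) :
    (l.map (Nat.cast : Nat → Int)).sum = ((l.sum : Nat) : Int) := by
  induction l with
  | nil => rfl
  | cons x xs ih => simp only [List.map_cons, List.sum_cons, ih, Nat.cast_add]

-- the total number of hit cells, counted row by row, is the number of hit positions
theorem sum_counts_eq_filter_posOf (m n : Int) (B : List (List String)) :
    ∀ (b : List (List String)) (s : Int),
    (((PySem.List.enumerate b s).map (fun p =>
        (PySem.List.enumerate p.2 0).map (fun q => hitB m n B p.1 q.1))).map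
      (fun hrow => PySem.List.count hrow true)).sum
    = ((posOf b s).filter (fun q => hitB m n B q.1 q.2)).length := by
  intro b
  induction b with
  | nil => intro s; simp [posOf, PySem.List.enumerate]
  | cons r rs ih =>
    intro s
    rw [PySem.List.enumerate_cons]
    simp only [List.map_cons, List.sum_cons, posOf, List.filter_append, List.length_append, ih]
    congr 1
    rw [count_true_eq_countP, List.countP_map, List.filter_map, List.length_map,
      ← List.countP_eq_length_filter]
    rfl

theorem mem_posOf_of_hitB {m n : Int} {board : List (List String)} {q : Int × Int}
    (h : hitB m n board q.1 q.2 = true) : q ∈ posOf board 0 := by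
  have hnn : 0 ≤ q.1 ∧ 0 ≤ q.2 := by
    rw [hitB_iff] at h
    obtain ⟨a, b, ha, hb, h1, _, h3, _, _⟩ := h
    omega
  have halpha := alpha_of_hitB h
  obtain ⟨h1, h2⟩ := alpha_in_range hnn.1 hnn.2 halpha
  rw [mem_posOf]
  refine ⟨q.1.toNat, q.2.toNat, h1, h2, ?_⟩
  have e1 : (q.1.toNat : Int) = q.1 := Int.toNat_of_nonneg hnn.1
  have e2 : (q.2.toNat : Int) = q.2 := Int.toNat_of_nonneg hnn.2
  rw [Prod.mk.injEq]
  omega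

theorem len_eraseSetA_eq (m n : Int) (board : List (List String)) :
    (eraseSetA m n board).length
      = ((posOf board 0).filter (fun q => hitB m n board q.1 q.2)).length := by
  apply List.Perm.length_eq
  rw [List.perm_ext_iff_of_nodup (nodup_eraseSetA m n board)
    (List.Nodup.filter _ (nodup_posOf board 0))]
  intro q
  rw [List.mem_filter, mem_eraseSetA_iff_hitB]
  constructor
  · intro h
    exact ⟨mem_posOf_of_hitB h, h⟩
  · intro h
    exact h.2

-- B's per-round counter k equals the size of A's erase set
theorem k_eq_len (m n : Int) (board : List (List String)) :
    (((PySem.List.enumerate board 0).map (fun p =>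
        (PySem.List.enumerate p.2 0).map (fun q => hitB m n board p.1 q.1))).map
      (fun hrow => (PySem.List.count hrow true : Int))).sum
    = PySem.Set.len (eraseSetA m n board) := by
  have e1 : (((PySem.List.enumerate board 0).map (fun p =>
        (PySem.List.enumerate p.2 0).map (fun q => hitB m n board p.1 q.1))).map
      (fun hrow => (PySem.List.count hrow true : Int)))
      = (((PySem.List.enumerate board 0).map (fun p =>
        (PySem.List.enumerate p.2 0).map (fun q => hitB m n board p.1 q.1))).map
      (fun hrow => PySem.List.count hrow true)).map (Nat.cast : Nat → Int) := by
    simp only [List.map_map]; rfl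
  rw [e1, sum_map_natCast, sum_counts_eq_filter_posOf, ← len_eraseSetA_eq]
  rfl


-- shapes: setZero never changes the lengths of the board or of its rows
theorem shape_setZero (b : List (List String)) (y x : Int) (hy : 0 ≤ y) (hx : 0 ≤ x) :
    (setZero b y x).map List.length = b.map List.length := by
  rw [setZero_eq_set hy hx]
  by_cases hlt : y.toNat < b.length
  · apply List.ext_getElem
    · simp
    · intro i h1 h2
      simp only [List.getElem_map, List.getElem_set]
      split
      · next he =>
        subst he
        rw [List.getD_eq_getElem b [] hlt, List.length_set]
      · rfl
  · rw [List.set_eq_of_length_le (by omega)]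

theorem shape_foldl_setZero (l : List (Int × Int)) (b : List (List String))
    (hl : ∀ p ∈ l, 0 ≤ p.1 ∧ 0 ≤ p.2) :
    (l.foldl (fun b p => setZero b p.1 p.2) b).map List.length = b.map List.length := by
  induction l generalizing b with
  | nil => rfl
  | cons p l ih =>
    simp only [List.foldl_cons]
    rw [ih _ (fun q hq => hl q (List.mem_cons_of_mem _ hq)),
      shape_setZero b p.1 p.2 (hl p (by simp)).1 (hl p (by simp)).2]

theorem getD_set' {α : Type} (l : List α) (k : Nat) (v : α) (d : α) (hk : k < l.length) (t : Nat) :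
    (l.set k v).getD t d = if t = k then v else l.getD t d := by
  by_cases h : t = k
  · subst h
    rw [if_pos rfl, List.getD_eq_getElem _ _ (by rwa [List.length_set]), List.getElem_set_self]
  · rw [if_neg h]
    by_cases h2 : t < l.length
    · rw [List.getD_eq_getElem _ _ (by rw [List.length_set]; omega),
        List.getD_eq_getElem _ _ h2, List.getElem_set_ne (by omega)]
    · rw [List.getD_eq_default _ _ (by rw [List.length_set]; omega),
        List.getD_eq_default _ _ (by omega)]

-- the single-cell write, seen through the total cell accessor
theorem cellAt_setZero (b : List (List String)) (y x i j : Int)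
    (hy : 0 ≤ y) (hx : 0 ≤ x) (hi : 0 ≤ i) (hj : 0 ≤ j)
    (hr : ∃ h : y.toNat < b.length, x.toNat < b[y.toNat].length) :
    cellAt (setZero b y x) i j = if (i, j) = (y, x) then "0" else cellAt b i j := by
  obtain ⟨h1, h2⟩ := hr
  rw [setZero_eq_set hy hx]
  unfold cellAt
  rw [PySem.List.pyGetD_of_nonneg _ _ hi, PySem.List.pyGetD_of_nonneg _ _ hi,
    PySem.List.pyGetD_of_nonneg _ _ hj, PySem.List.pyGetD_of_nonneg _ _ hj,
    List.getD_eq_getElem b [] h1,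
    getD_set' b y.toNat _ [] h1 i.toNat]
  by_cases hiy : i.toNat = y.toNat
  · rw [if_pos hiy, getD_set' _ x.toNat "0" "" h2 j.toNat]
    have hiy' : i = y := by omega
    subst hiy'
    by_cases hjx : j.toNat = x.toNat
    · have : j = x := by omega
      subst this
      rw [if_pos rfl, if_pos rfl]
    · have : ¬ ((i, j) = (i, x)) := by simp; omega
      rw [if_neg hjx, if_neg this, List.getD_eq_getElem b [] h1]
  · have hiy' : ¬ (i = y) := by omega
    have : ¬ ((i, j) = (y, x)) := by simp [hiy']
    rw [if_neg hiy, if_neg this]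

theorem cellAt_foldl_setZero (l : List (Int × Int)) (b : List (List String))
    (hl : ∀ p ∈ l, 0 ≤ p.1 ∧ 0 ≤ p.2 ∧ ∃ h : p.1.toNat < b.length, p.2.toNat < b[p.1.toNat].length)
    (i j : Int) (hi : 0 ≤ i) (hj : 0 ≤ j) :
    cellAt (l.foldl (fun b p => setZero b p.1 p.2) b) i j
      = if (i, j) ∈ l then "0" else cellAt b i j := by
  induction l generalizing b with
  | nil => simp
  | cons p l ih =>
    obtain ⟨hp1, hp2, hp3, hp4⟩ := hl p (by simp)
    simp only [List.foldl_cons]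
    have hshape := shape_setZero b p.1 p.2 hp1 hp2
    have hlen : (setZero b p.1 p.2).length = b.length := by
      have := congrArg List.length hshape; simpa using this
    have hrowlen : ∀ (k : Nat) (hk : k < b.length), ((setZero b p.1 p.2)[k]'(by omega)).length = b[k].length := by
      intro k hk
      have h1 : ((setZero b p.1 p.2).map List.length)[k]'(by simpa [hlen] using hk)
          = (b.map List.length)[k]'(by simpa using hk) := by
        exact List.getElem_of_eq hshape _
      simpa using h1
    rw [ih _ (by
      intro q hq
      obtain ⟨hq1, hq2, hq3, hq4⟩ := hl q (List.mem_cons_of_mem _ hq)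
      exact ⟨hq1, hq2, by omega, by rw [hrowlen q.1.toNat hq3]; exact hq4⟩)]
    rw [cellAt_setZero b p.1 p.2 i j hp1 hp2 hi hj ⟨hp3, hp4⟩]
    by_cases hmem : (i, j) ∈ l
    · simp [hmem]
    · by_cases hep : (i, j) = p
      · simp [hep]
      · have : ¬ ((i, j) = (p.1, p.2)) := by simpa using hep
        simp [hmem, this, hep]


-- proof-side names for B's per-round data
def hitsOf (m n : Int) (board : List (List String)) : List (List Bool) :=
  (PySem.List.enumerate board 0).map (fun p =>
    (PySem.List.enumerate p.2 0).map (fun q => hitB m n board p.1 q.1))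

def maskOf (m n : Int) (board : List (List String)) : List (List String) :=
  (board.zip (hitsOf m n board)).map (fun rh =>
    (rh.1.zip rh.2).map (fun p => if p.2 then "0" else p.1))

theorem hitsOf_length (m n : Int) (board : List (List String)) :
    (hitsOf m n board).length = board.length := by
  unfold hitsOf
  simp [PySem.List.length_enumerate]

theorem hitsOf_row (m n : Int) (board : List (List String)) (i : Nat)
    (hi : i < board.length) :
    (hitsOf m n board)[i]'(by rw [hitsOf_length]; exact hi)
      = (PySem.List.enumerate board[i] 0).map (fun q => hitB m n board (i : Int) q.1) := by
  unfold hitsOf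
  simp [PySem.List.getElem_enumerate]

theorem hitsOf_row_length (m n : Int) (board : List (List String)) (i : Nat)
    (hi : i < board.length) :
    ((hitsOf m n board)[i]'(by rw [hitsOf_length]; exact hi)).length = board[i].length := by
  rw [hitsOf_row m n board i hi]
  simp [PySem.List.length_enumerate]

theorem hitsOf_cell (m n : Int) (board : List (List String)) (i j : Nat)
    (hi : i < board.length) (hj : j < board[i].length) :
    ((hitsOf m n board)[i]'(by rw [hitsOf_length]; exact hi))[j]'(by rw [hitsOf_row_length m n board i hi]; exact hj)
      = hitB m n board (i : Int) (j : Int) := by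
  have e := hitsOf_row m n board i hi
  have hj2 : j < ((hitsOf m n board)[i]'(by rw [hitsOf_length]; exact hi)).length := by
    rw [hitsOf_row_length m n board i hi]; exact hj
  have e1 := List.getElem_of_eq e hj2
  rw [List.getElem_map] at e1
  rw [e1]
  simp [PySem.List.getElem_enumerate]

theorem maskOf_length (m n : Int) (board : List (List String)) :
    (maskOf m n board).length = board.length := by
  unfold maskOf
  simp [hitsOf_length]

theorem maskOf_row_length (m n : Int) (board : List (List String)) (i : Nat)
    (hi : i < board.length) :
    ((maskOf m n board)[i]'(by rw [maskOf_length]; exact hi)).length = board[i].length := by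
  unfold maskOf
  simp only [List.getElem_map, List.getElem_zip, List.length_map, List.length_zip]
  rw [hitsOf_row_length m n board i hi]
  omega

theorem maskOf_cell (m n : Int) (board : List (List String)) (i j : Nat)
    (hi : i < board.length) (hj : j < board[i].length) :
    ((maskOf m n board)[i]'(by rw [maskOf_length]; exact hi))[j]'(by rw [maskOf_row_length m n board i hi]; exact hj)
      = if hitB m n board (i : Int) (j : Int) then "0" else board[i][j] := by
  unfold maskOf
  simp only [List.getElem_map, List.getElem_zip]
  rw [hitsOf_cell m n board i j hi hj]

-- the erase loop of A produces exactly the masked board of B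
set_option maxHeartbeats 1000000 in
theorem board2_eq_maskOf (m n : Int) (board : List (List String)) :
    (eraseSetA m n board).foldl (fun b p => setZero b p.1 p.2) board = maskOf m n board := by
  have hl : ∀ p ∈ eraseSetA m n board, 0 ≤ p.1 ∧ 0 ≤ p.2 ∧
      ∃ h : p.1.toNat < board.length, p.2.toNat < board[p.1.toNat].length := by
    intro p hp
    obtain ⟨h1, h2, h3⟩ := alpha_of_mem_eraseSetA hp
    exact ⟨h1, h2, alpha_in_range h1 h2 h3⟩
  have hshape := shape_foldl_setZero (eraseSetA m n board) board
    (fun p hp => ⟨(hl p hp).1, (hl p hp).2.1⟩)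
  have hlen : ((eraseSetA m n board).foldl (fun b p => setZero b p.1 p.2) board).length
      = board.length := by
    have := congrArg List.length hshape; simpa using this
  have hrowlen : ∀ (k : Nat) (hk : k < board.length),
      (((eraseSetA m n board).foldl (fun b p => setZero b p.1 p.2) board)[k]'(by omega)).length
        = board[k].length := by
    intro k hk
    have h1 := List.getElem_of_eq hshape (by simpa [hlen] using hk :
      k < (((eraseSetA m n board).foldl (fun b p => setZero b p.1 p.2) board).map List.length).length)
    simpa using h1
  apply List.ext_getElem
  · rw [hlen, maskOf_length]
  intro i h1 h2
  apply List.ext_getElem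
  · rw [hrowlen i (by omega), maskOf_row_length m n board i (by omega)]
  intro j hj1 hj2
  have hi : i < board.length := by omega
  have hj : j < board[i].length := by rw [← hrowlen i hi]; exact hj1
  -- left side via cellAt
  have hcell := cellAt_foldl_setZero (eraseSetA m n board) board hl (i : Int) (j : Int)
    (by omega) (by omega)
  rw [cellAt_eq_getElem (by omega) (by omega) (by simpa using h1) (by simpa using hj1)] at hcell
  rw [cellAt_eq_getElem (by omega) (by omega) (by simpa using hi) (by simpa using hj)] at hcell
  simp only [Int.toNat_natCast] at hcell
  rw [hcell]
  rw [maskOf_cell m n board i j hi (by simpa using hj)]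
  by_cases hmem : ((i : Int), (j : Int)) ∈ eraseSetA m n board
  · rw [if_pos hmem, if_pos ((mem_eraseSetA_iff_hitB m n board _).mp hmem)]
  · rw [if_neg hmem, if_neg (fun hh => hmem ((mem_eraseSetA_iff_hitB m n board _).mpr hh))]

-- A's gravity on a row of single-character cells is B's filter-and-pad

theorem map_filter_chars (line : List String) (h : ∀ c ∈ line, c.toList.length = 1) :
    (((line.map String.toList).flatten.filter (fun c => c ≠ '0')).map
      (fun c => String.ofList [c])) = line.filter (fun c => c ≠ "0") := by
  induction line with
  | nil => rfl
  | cons c rest ih =>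
    obtain ⟨ch, hch⟩ : ∃ ch, c.toList = [ch] := by
      have := h c (by simp)
      cases hc : c.toList with
      | nil => rw [hc] at this; simp at this
      | cons a t =>
        rw [hc] at this
        simp at this
        exact ⟨a, by rw [this]⟩
    have hc' : c = String.ofList [ch] := by rw [← hch, String.ofList_toList]
    have ihr := ih (fun c hc => h c (by simp [hc]))
    simp only [List.map_cons, List.flatten_cons, hch, List.filter_append, List.map_append]
    by_cases hz : ch = '0'
    · subst hz
      have hc0 : c = "0" := by rw [hc']
      subst hc0
      rw [show List.filter (fun c => decide (c ≠ '0')) ['0'] = [] from rfl]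
      rw [List.filter_cons_of_neg (by simp)]
      simpa using ihr
    · have hcne : c ≠ "0" := by
        intro he; rw [he] at hch; simp at hch; exact hz hch.symm
      rw [show List.filter (fun c => decide (c ≠ '0')) [ch] = [ch] from by simp [hz]]
      rw [List.filter_cons_of_pos (by simpa using hcne)]
      simp only [List.map_cons, List.map_nil]
      rw [← hc', ihr]
      rfl

theorem count_zero_eq (line : List String) :
    PySem.List.count line "0" = line.length - (line.filter (fun c => c ≠ "0")).length := by
  have e : PySem.List.count line "0" = line.countP (fun c => !(decide (c ≠ "0"))) := by
    unfold PySem.List.count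
    rw [List.count_eq_countP]
    apply List.countP_congr
    intro c _
    by_cases hc : c = "0" <;> simp [hc]
  rw [e, List.countP_eq_length_filter,
    List.length_eq_length_filter_add (l := line) (fun c => decide (c ≠ "0"))]
  omega

theorem dropRow_eq_collapseB (line : List String) (h : ∀ c ∈ line, c.toList.length = 1) :
    (List.replicate (PySem.List.count line "0") '0' ++
      PySem.Chars.replace (PySem.Chars.join [] (line.map String.toList)) ['0'] []).map
        (fun c => String.ofList [c]) = collapseB line := by
  rw [join_nil_flatten, replace_filter, List.map_append, List.map_replicate,
    map_filter_chars line h]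
  unfold collapseB
  rw [count_zero_eq]


theorem singles_maskOf (m n : Int) (board : List (List String))
    (hs : ∀ row ∈ board, ∀ c ∈ row, c.toList.length = 1) :
    ∀ row ∈ maskOf m n board, ∀ c ∈ row, c.toList.length = 1 := by
  intro row hrow c hc
  unfold maskOf at hrow
  obtain ⟨rh, hrh, rfl⟩ := List.mem_map.mp hrow
  obtain ⟨p, hp, rfl⟩ := List.mem_map.mp hc
  have hr : rh.1 ∈ board := (List.of_mem_zip hrh).1
  have hp1 : p.1 ∈ rh.1 := (List.of_mem_zip hp).1
  cases hb : p.2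
  · simpa using hs rh.1 hr p.1 hp1
  · simp

theorem singles_collapse (m n : Int) (board : List (List String))
    (hs : ∀ row ∈ board, ∀ c ∈ row, c.toList.length = 1) :
    ∀ row ∈ (maskOf m n board).map collapseB, ∀ c ∈ row, c.toList.length = 1 := by
  intro row hrow c hc
  obtain ⟨r, hr, rfl⟩ := List.mem_map.mp hrow
  unfold collapseB at hc
  rcases List.mem_append.mp hc with hc | hc
  · rw [List.eq_of_mem_replicate hc]; rfl
  · exact singles_maskOf m n board hs r hr c (List.mem_of_mem_filter hc)

theorem boardsA_eq_B (m n : Int) (board : List (List String))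
    (hs : ∀ row ∈ board, ∀ c ∈ row, c.toList.length = 1) :
    dropBlockA ((eraseSetA m n board).foldl (fun b p => setZero b p.1 p.2) board)
      = (board.zip ((PySem.List.enumerate board 0).map (fun p =>
          (PySem.List.enumerate p.2 0).map (fun q => hitB m n board p.1 q.1)))).map (fun rh =>
          collapseB ((rh.1.zip rh.2).map (fun p => if p.2 then "0" else p.1))) := by
  rw [board2_eq_maskOf]
  have hrhs : (board.zip ((PySem.List.enumerate board 0).map (fun p =>
          (PySem.List.enumerate p.2 0).map (fun q => hitB m n board p.1 q.1)))).map (fun rh =>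
          collapseB ((rh.1.zip rh.2).map (fun p => if p.2 then "0" else p.1)))
      = (maskOf m n board).map collapseB := by
    unfold maskOf hitsOf
    rw [List.map_map]
    rfl
  rw [hrhs]
  unfold dropBlockA
  rw [List.map_map]
  apply List.map_congr_left
  intro line hline
  exact dropRow_eq_collapseB line (singles_maskOf m n board hs line hline)

-- both sides return cnt when the erase set is empty
theorem round_return (m n : Int) (board : List (List String)) (cnt : Int)
    (hS : eraseSetA m n board = []) :
    find4Block m n board cnt = cnt ∧ find4Block_alt m n board cnt = cnt := by
  have hA0 : PySem.Set.len (eraseSetA m n board) = 0 := by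
    rw [hS]; rfl
  have hB0 : (((PySem.List.enumerate board 0).map (fun p =>
      (PySem.List.enumerate p.2 0).map (fun q => hitB m n board p.1 q.1))).map
    (fun hrow => (PySem.List.count hrow true : Int))).sum = 0 := by
    rw [k_eq_len]; exact hA0
  constructor
  · rw [find4Block, if_pos hA0]
  · rw [find4Block_alt, if_pos hB0]

theorem equiv_aux (m n : Int) : ∀ (N : Nat) (board : List (List String)) (cnt : Int),
    mu board ≤ N → (∀ row ∈ board, ∀ c ∈ row, c.toList.length = 1) →
    find4Block m n board cnt = find4Block_alt m n board cnt := by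
  intro N
  induction N with
  | zero =>
    intro board cnt hmu hs
    by_cases hS : eraseSetA m n board = []
    · rw [(round_return m n board cnt hS).1, (round_return m n board cnt hS).2]
    · have := muA_decreases m n board hS
      omega
  | succ N ih =>
    intro board cnt hmu hs
    by_cases hS : eraseSetA m n board = []
    · rw [(round_return m n board cnt hS).1, (round_return m n board cnt hS).2]
    · have hlen0 : (eraseSetA m n board).length ≠ 0 := by
        simpa [List.length_eq_zero_iff] using hS
      have hA : ¬ (PySem.Set.len (eraseSetA m n board) = 0) := by
        unfold PySem.Set.len
        simpa using hlen0
      have hB : ¬ ((((PySem.List.enumerate board 0).map (fun p =>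
          (PySem.List.enumerate p.2 0).map (fun q => hitB m n board p.1 q.1))).map
        (fun hrow => (PySem.List.count hrow true : Int))).sum = 0) := by
        rw [k_eq_len]; exact hA
      rw [find4Block, find4Block_alt, if_neg hA, if_neg hB]
      have hboards := boardsA_eq_B m n board hs
      have hmu3 : mu ((board.zip ((PySem.List.enumerate board 0).map (fun p =>
          (PySem.List.enumerate p.2 0).map (fun q => hitB m n board p.1 q.1)))).map (fun rh =>
          collapseB ((rh.1.zip rh.2).map (fun p => if p.2 then "0" else p.1)))) < mu board := by
        rw [← hboards]
        exact muA_decreases m n board hS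
      have hsingles3 := singles_collapse m n board hs
      have hrhs : (board.zip ((PySem.List.enumerate board 0).map (fun p =>
          (PySem.List.enumerate p.2 0).map (fun q => hitB m n board p.1 q.1)))).map (fun rh =>
          collapseB ((rh.1.zip rh.2).map (fun p => if p.2 then "0" else p.1)))
        = (maskOf m n board).map collapseB := by
        unfold maskOf hitsOf
        rw [List.map_map]
        rfl
      rw [hboards]
      rw [ih _ _ (by omega) (by rw [hrhs]; exact hsingles3)]
      have hc : PySem.Set.len (eraseSetA m n board) + cnt
          = cnt + (((PySem.List.enumerate board 0).map (fun p =>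
          (PySem.List.enumerate p.2 0).map (fun q => hitB m n board p.1 q.1))).map
        (fun hrow => (PySem.List.count hrow true : Int))).sum := by
        rw [k_eq_len]
        exact add_comm _ _
      rw [hc]

theorem main_equiv (m n : Int) (board : List (List String)) (cnt : Int)
    (hpre : Pre_find4Block m n board cnt) :
    find4Block m n board cnt = find4Block_alt m n board cnt := by
  unfold Pre_find4Block at hpre
  rcases hpre with h | h | ⟨_, _, hsingles⟩
  · have hS := eraseSetA_nil_of_small m n board (Or.inl h)
    rw [(round_return m n board cnt hS).1, (round_return m n board cnt hS).2]
  · have hS := eraseSetA_nil_of_small m n board (Or.inr h)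
    rw [(round_return m n board cnt hS).1, (round_return m n board cnt hS).2]
  · exact equiv_aux m n (mu board) board cnt le_rfl hsingles

-- ===== VERDICT (by name: the statement is the Claim_ definition above) =====
theorem find4Block_spec : Claim_equal_find4Block := by
  intro m n board cnt _ hpre
  unfold Spec_find4Block
  exact main_equiv m n board cnt hpre
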